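-- pv_equiv track=rewrite | github.com/ruoyiw/COMP30027-Machine-learning | project 1/2018S1-proj1_data/pro1.py | calculate_posteriors_supervised
-- ===== SOURCE A (Python) =====
-- def calculate_posteriors_supervised(trainingSet):
--     count_posteriors = {}
--     for i, val in enumerate(trainingSet):
--         for j in range(len(val)-1):
--             if j not in count_posteriors:
--                 count_posteriors[j] = {}
--             if val[len(val)-1] not in count_posteriors[j] :
--                 count_posteriors[j][val[len(val)-1]] = {}
--             if val[j] not in count_posteriors[j][val[len(val)-1]]:
--                 count_posteriors[j][val[len(val)-1]][val[j]] = 1;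
--             else:
--                 count_posteriors[j][val[len(val)-1]][val[j]] += 1;
--     return count_posteriors
-- ===== SOURCE B (Python) =====
-- def calculate_posteriors_supervised(trainingSet):
--     # Column-major: process one attribute position at a time, counting by list.count
--     # at the first occurrence of each (class, value) pair instead of incrementing.
--     width = 0
--     for row in trainingSet:
--         width = max(width, len(row))
--     result = {}
--     for j in range(width - 1):
--         pairs = [(row[-1], row[j]) for row in trainingSet if len(row) > j + 1]
--         per_class = {}
--         for cls, v in pairs:
--             if cls not in per_class:
--                 per_class[cls] = {}
--             if v not in per_class[cls]:
--                 per_class[cls][v] = pairs.count((cls, v))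
--         result[j] = per_class
--     return result
-- ===== Notes on version B (the rewrite author's own statement) =====
-- stated objective: alternative
-- what changed: Column-major staged algorithm: compute the maximum row width, then for each attribute index build that column's (class, value) pair list and fill its nested dict by writing pairs.count((cls, v)) at the first occurrence of each pair, instead of A's single row-major pass that increments counts in the nested dict cell by cell.
import Mathlib
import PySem

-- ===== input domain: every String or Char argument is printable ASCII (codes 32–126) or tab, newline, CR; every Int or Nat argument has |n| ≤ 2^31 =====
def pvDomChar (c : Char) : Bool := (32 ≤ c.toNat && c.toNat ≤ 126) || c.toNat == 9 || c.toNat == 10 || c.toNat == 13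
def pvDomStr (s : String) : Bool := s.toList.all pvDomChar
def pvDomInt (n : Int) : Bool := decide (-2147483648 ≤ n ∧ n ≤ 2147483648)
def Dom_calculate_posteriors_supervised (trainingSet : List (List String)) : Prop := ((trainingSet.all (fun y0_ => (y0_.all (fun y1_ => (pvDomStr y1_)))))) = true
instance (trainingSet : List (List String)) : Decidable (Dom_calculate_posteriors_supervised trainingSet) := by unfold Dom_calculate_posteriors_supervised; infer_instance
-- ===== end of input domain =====

-- B replaces A's row-major incremental counting in the nested dict by a column-major staged
-- algorithm (max width, then per attribute index a (class, value) pair column whose counts are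
-- written via list.count at each pair's first occurrence); same results, different traversal
-- ("alternative", not claimed faster).

-- ===== PORT A =====
-- Literal port of A: nested dict count_posteriors built row by row; in-place mutation of the
-- inner dicts rendered as read / modify / write-back (insert overwrites in place, so item order
-- is preserved exactly as in Python). val[...] indices are in range under range(len(val)-1)
-- nonempty, so pyGetD is exact here.
def calculate_posteriors_supervised (trainingSet : List (List String)) : List (Int × List (String × List (String × Int))) :=
  let cp : PySem.Dict Int (PySem.Dict String (PySem.Dict String Int)) :=
    trainingSet.foldl (fun cp val =>
      (PySem.List.pyRange 0 ((val.length : Int) - 1) 1).foldl (fun cp j =>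
        let cp := if !(cp.contains j) then cp.insert j PySem.Dict.empty else cp
        let cls := PySem.List.pyGetD val ((val.length : Int) - 1) ""
        let dj := cp.getD j PySem.Dict.empty
        let dj := if !(dj.contains cls) then dj.insert cls PySem.Dict.empty else dj
        let v := PySem.List.pyGetD val j ""
        let djc := dj.getD cls PySem.Dict.empty
        let djc := if !(djc.contains v) then djc.insert v 1 else djc.insert v (djc.getD v 0 + 1)
        cp.insert j (dj.insert cls djc)) cp) PySem.Dict.empty
  cp.items.map (fun p => (p.1, p.2.items.map (fun q => (q.1, q.2.items))))

-- ===== PORT B =====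
-- Literal port of B (Source B): width = max row length (accumulator loop); for each attribute index j
-- the column of (row[-1], row[j]) pairs (comprehension with guard = filter + map), then the
-- per-class dict filled by writing pairs.count((cls, v)) at each pair's first occurrence.
def calculate_posteriors_supervised_alt (trainingSet : List (List String)) : List (Int × List (String × List (String × Int))) :=
  let width : Int := trainingSet.foldl (fun m row => max m (PySem.List.len row)) 0
  let result : PySem.Dict Int (PySem.Dict String (PySem.Dict String Int)) :=
    (PySem.List.pyRange 0 (width - 1) 1).foldl (fun result j =>
      let pairs : List (String × String) :=
        (trainingSet.filter (fun row => decide (PySem.List.len row > j + 1))).map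
          (fun row => (PySem.List.pyGetD row (-1) "", PySem.List.pyGetD row j ""))
      let per_class : PySem.Dict String (PySem.Dict String Int) :=
        pairs.foldl (fun per_class p =>
          let per_class := if !(per_class.contains p.1) then per_class.insert p.1 PySem.Dict.empty else per_class
          let d := per_class.getD p.1 PySem.Dict.empty
          if !(d.contains p.2) then per_class.insert p.1 (d.insert p.2 (pairs.count p : Int)) else per_class)
          PySem.Dict.empty
      result.insert j per_class) PySem.Dict.empty
  result.items.map (fun p => (p.1, p.2.items.map (fun q => (q.1, q.2.items))))

-- ===== PRECONDITION & SPEC =====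
def Spec_calculate_posteriors_supervised (trainingSet : List (List String)) (out : List (Int × List (String × List (String × Int)))) : Prop := out = calculate_posteriors_supervised_alt trainingSet
instance (trainingSet : List (List String)) (out : List (Int × List (String × List (String × Int)))) : Decidable (Spec_calculate_posteriors_supervised trainingSet out) := by unfold Spec_calculate_posteriors_supervised; infer_instance

-- ===== CLAIM (what is proved, stated in full; the proofs are below) =====
def Claim_equal_calculate_posteriors_supervised : Prop := ∀ (trainingSet : List (List String)), Dom_calculate_posteriors_supervised trainingSet → Spec_calculate_posteriors_supervised trainingSet (calculate_posteriors_supervised trainingSet)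

-- ===== LEMMAS AND PROOFS =====

-- The per-row cell list: one (j, class, value) triple per attribute position (row-major).
def pvCellsOf (row : List String) : List (Int × String × String) :=
  (PySem.List.pyRange 0 ((row.length : Int) - 1) 1).map
    (fun j => (j, PySem.List.pyGetD row ((row.length : Int) - 1) "", PySem.List.pyGetD row j ""))

def pvCells (ts : List (List String)) : List (Int × String × String) := ts.flatMap pvCellsOf

-- Canonical A-side step functions (incremental counting in the nested dict).
def pvVStepA (djc : PySem.Dict String Int) (c : Int × String × String) : PySem.Dict String Int :=
  djc.insert c.2.2 (djc.getD c.2.2 0 + 1)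

def pvIStepA (dj : PySem.Dict String (PySem.Dict String Int)) (c : Int × String × String) :
    PySem.Dict String (PySem.Dict String Int) :=
  dj.insert c.2.1 (pvVStepA (dj.getD c.2.1 PySem.Dict.empty) c)

def pvNStepA (r : PySem.Dict Int (PySem.Dict String (PySem.Dict String Int))) (c : Int × String × String) :
    PySem.Dict Int (PySem.Dict String (PySem.Dict String Int)) :=
  r.insert c.1 (pvIStepA (r.getD c.1 PySem.Dict.empty) c)

-- A-side step on column pairs (same as pvIStepA, the index argument dropped).
def pvAPairStep (pc : PySem.Dict String (PySem.Dict String Int)) (p : String × String) :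
    PySem.Dict String (PySem.Dict String Int) :=
  pc.insert p.1 ((pc.getD p.1 PySem.Dict.empty).insert p.2 ((pc.getD p.1 PySem.Dict.empty).getD p.2 0 + 1))

-- B's guarded column step with an abstract count function.
def pvBStep (cnt : String × String → Int) (pc : PySem.Dict String (PySem.Dict String Int))
    (p : String × String) : PySem.Dict String (PySem.Dict String Int) :=
  let pc := if !(pc.contains p.1) then pc.insert p.1 PySem.Dict.empty else pc
  let d := pc.getD p.1 PySem.Dict.empty
  if !(d.contains p.2) then pc.insert p.1 (d.insert p.2 (cnt p)) else pc

-- Insert-form of pvBStep (always one insert at p.1), equal to it on Nodup-key dicts.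
def pvInsStep (cnt : String × String → Int) (pc : PySem.Dict String (PySem.Dict String Int))
    (p : String × String) : PySem.Dict String (PySem.Dict String Int) :=
  pc.insert p.1
    (if !((pc.getD p.1 PySem.Dict.empty).contains p.2)
     then (pc.getD p.1 PySem.Dict.empty).insert p.2 (cnt p)
     else pc.getD p.1 PySem.Dict.empty)

-- B's column of pairs at attribute index j (exactly the port's comprehension).
def pvColPairs (ts : List (List String)) (j : Int) : List (String × String) :=
  (ts.filter (fun row => decide (PySem.List.len row > j + 1))).map
    (fun row => (PySem.List.pyGetD row (-1) "", PySem.List.pyGetD row j ""))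

-- B's max row width.
def pvWidth (ts : List (List String)) : Int := ts.foldl (fun m row => max m (PySem.List.len row)) 0

-- A fold of nested per-row folds is a fold over the flattened cell list.
lemma pv_foldl_flatMap {α β σ : Type} (h : α → List β) (step : σ → β → σ) :
    ∀ (l : List α) (init : σ),
      (l.flatMap h).foldl step init = l.foldl (fun d row => (h row).foldl step d) init := by
  intro l
  induction l with
  | nil => intro init; rfl
  | cons x t ih => intro init; simp [List.flatMap_cons, List.foldl_append, ih]

-- row[-1] = row[len(row)-1] on a nonempty row.
lemma pv_pyGetD_neg_one (row : List String) (h : row ≠ []) :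
    PySem.List.pyGetD row (-1) "" = PySem.List.pyGetD row ((row.length : Int) - 1) "" := by
  have hl : 0 < row.length := List.length_pos_iff.mpr h
  simp only [PySem.List.pyGetD, PySem.List.pyGet?, PySem.List.pyIdx?]
  rw [if_neg (by omega), if_pos (by omega : -((row.length : Int)) ≤ -1),
    if_pos (by omega : (0 : Int) ≤ (row.length : Int) - 1),
    if_pos (by omega : (row.length : Int) - 1 < (row.length : Int))]
  have : (row.length - (-(-1 : Int)).toNat) = ((row.length : Int) - 1).toNat := by omega
  rw [this]

-- A's literal inner-loop body is the canonical nested step.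
lemma pv_stepA_canon (cp : PySem.Dict Int (PySem.Dict String (PySem.Dict String Int)))
    (cls v : String) (j : Int) :
    (let cp' := if !(cp.contains j) then cp.insert j PySem.Dict.empty else cp
     let dj := cp'.getD j PySem.Dict.empty
     let dj' := if !(dj.contains cls) then dj.insert cls PySem.Dict.empty else dj
     let djc := dj'.getD cls PySem.Dict.empty
     let djc' := if !(djc.contains v) then djc.insert v 1 else djc.insert v (djc.getD v 0 + 1)
     cp'.insert j (dj'.insert cls djc'))
    = pvNStepA cp (j, cls, v) := by
  simp only [pvNStepA, pvIStepA, pvVStepA]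
  by_cases hj : cp.contains j
  · by_cases hc : (cp.getD j PySem.Dict.empty).contains cls
    · by_cases hv : ((cp.getD j PySem.Dict.empty).getD cls PySem.Dict.empty).contains v
      · simp [hj, hc, hv]
      · have hv' : ((cp.getD j PySem.Dict.empty).getD cls PySem.Dict.empty).contains v = false := by
          simpa using hv
        simp [hj, hc, hv', PySem.Dict.getD_of_not_contains _ _ hv']
    · have hc' : (cp.getD j PySem.Dict.empty).contains cls = false := by simpa using hc
      simp [hj, hc', PySem.Dict.getD_insert_self, PySem.Dict.contains_empty,
        PySem.Dict.getD_of_not_contains _ _ hc', PySem.Dict.getD_empty,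
        PySem.Dict.insert_insert_self]
  · have hj' : cp.contains j = false := by simpa using hj
    simp [hj', PySem.Dict.getD_insert_self, PySem.Dict.contains_empty,
      PySem.Dict.getD_of_not_contains _ _ hj', PySem.Dict.getD_empty,
      PySem.Dict.insert_insert_self]

-- Re-inserting a present key with its current value is a no-op (Nodup keys).
lemma pv_insert_getD_self {κ ν : Type} [BEq κ] [LawfulBEq κ] (d : PySem.Dict κ ν) (k : κ) (dflt : ν)
    (hnd : d.keys.Nodup) (hc : d.contains k = true) :
    d.insert k (d.getD k dflt) = d := by
  apply PySem.Dict.ext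
  rw [PySem.Dict.items_insert_of_contains d _ hc]
  have : ∀ p ∈ d.items, (if p.1 == k then (k, d.getD k dflt) else p) = p := by
    intro p hp
    by_cases hk : p.1 = k
    · obtain ⟨p1, p2⟩ := p
      simp only at hk
      subst hk
      have := PySem.Dict.getD_of_mem_items d hp hnd dflt
      simp [this]
    · simp [hk]
  calc d.items.map (fun p => if p.1 == k then (k, d.getD k dflt) else p)
      = d.items.map id := List.map_congr_left this
    _ = d.items := List.map_id _

-- getD after a group-by fold: only the matching-key steps contribute.
lemma pv_getD_foldl_insert_group {κ ν β : Type} [BEq κ] [LawfulBEq κ] [DecidableEq κ]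
    (key : β → κ) (g : ν → β → ν) (d0 : ν) :
    ∀ (l : List β) (r : PySem.Dict κ ν) (j : κ),
      (l.foldl (fun r x => r.insert (key x) (g (r.getD (key x) d0) x)) r).getD j d0
        = (l.filter (fun x => key x == j)).foldl g (r.getD j d0) := by
  intro l
  induction l with
  | nil => intro r j; rfl
  | cons x t ih =>
    intro r j
    by_cases hx : key x = j
    · simp [List.foldl_cons, ih, hx]
    · simp [List.foldl_cons, ih, hx, PySem.Dict.getD_insert, Ne.symm hx]

-- Two dicts with equal Nodup key lists and equal lookups are equal.
lemma pv_dict_ext {κ ν : Type} [BEq κ] [LawfulBEq κ] (d d' : PySem.Dict κ ν) (dflt : ν)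
    (h1 : d.keys.Nodup) (h2 : d'.keys.Nodup) (hk : d.keys = d'.keys)
    (hg : ∀ k, d.getD k dflt = d'.getD k dflt) : d = d' := by
  apply PySem.Dict.ext
  rw [PySem.Dict.items_eq_map_keys d h1 dflt, PySem.Dict.items_eq_map_keys d' h2 dflt, hk]
  exact List.map_congr_left (fun k _ => by rw [hg k])

-- count through an injective-on-the-list map.
lemma pv_count_map_inj {α β : Type} [BEq α] [LawfulBEq α] [BEq β] [LawfulBEq β]
    (f : α → β) (x : α) :
    ∀ (l : List α), (∀ y ∈ l, f y = f x → y = x) → (l.map f).count (f x) = l.count x := by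
  intro l
  induction l with
  | nil => intro _; rfl
  | cons y t ih =>
    intro hinj
    have ih' := ih (fun a ha hfa => hinj a (List.mem_cons_of_mem y ha) hfa)
    simp only [List.map_cons, List.count_cons, ih']
    congr 1
    by_cases hy : f y = f x
    · have : y = x := hinj y (List.mem_cons_self) hy
      simp [this]
    · have : y ≠ x := fun hc => hy (by rw [hc])
      simp [hy, this]

-- Items of the guarded write-once fold: first occurrences, each with its stored value.
lemma pv_guarded_items (c : String → Int) :
    ∀ (L : List String),
      (L.foldl (fun d v => if !(d.contains v) then d.insert v (c v) else d)
          PySem.Dict.empty).items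
        = (PySem.Set.ofList L).map (fun v => (v, c v)) := by
  intro L
  induction L using List.reverseRecOn with
  | nil => rfl
  | append_singleton M x ih =>
    rw [List.foldl_append, List.foldl_cons, List.foldl_nil]
    have hkeys : (M.foldl (fun d v => if !(d.contains v) then d.insert v (c v) else d)
        PySem.Dict.empty).keys = PySem.Set.ofList M := by
      simp only [PySem.Dict.keys, ih, List.map_map]
      exact List.map_id _
    have hcont : (M.foldl (fun d v => if !(d.contains v) then d.insert v (c v) else d)
        PySem.Dict.empty).contains x = decide (x ∈ PySem.Set.ofList M) := by
      rw [PySem.Dict.contains_eq_decide_mem_keys, hkeys]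
    by_cases hx : x ∈ M
    · have hx' : x ∈ PySem.Set.ofList M := (PySem.Set.mem_ofList M x).mpr hx
      rw [PySem.Set.ofList_append_singleton, PySem.Set.add_of_mem hx']
      simp only [hcont, hx', decide_true, Bool.not_true, Bool.false_eq_true, if_false]
      exact ih
    · have hx' : x ∉ PySem.Set.ofList M := fun h => hx ((PySem.Set.mem_ofList M x).mp h)
      rw [PySem.Set.ofList_append_singleton, PySem.Set.add_of_not_mem hx']
      simp only [hcont, hx', decide_false, Bool.not_false, if_true]
      rw [PySem.Dict.items_insert_of_not_contains _ _ (by rw [hcont]; simp [hx']),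
        ih, List.map_append, List.map_singleton]

-- The guarded write-once fold with c = total count IS the counter.
lemma pv_guarded_eq_counter (L : List String) :
    L.foldl (fun d v => if !(d.contains v) then d.insert v ((L.count v : Int)) else d)
        PySem.Dict.empty
      = PySem.Dict.counter L := by
  apply PySem.Dict.ext
  rw [pv_guarded_items (fun v => (L.count v : Int)) L, PySem.Dict.items_counter]

-- pvBStep = pvInsStep along any fold from a Nodup-key start.
lemma pv_bstep_insert_form (cnt : String × String → Int) :
    ∀ (P : List (String × String)) (pc : PySem.Dict String (PySem.Dict String Int)),
      pc.keys.Nodup → P.foldl (pvBStep cnt) pc = P.foldl (pvInsStep cnt) pc := by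
  intro P
  induction P with
  | nil => intro pc _; rfl
  | cons p t ih =>
    intro pc hnd
    have hstep : pvBStep cnt pc p = pvInsStep cnt pc p := by
      by_cases hc : pc.contains p.1
      · by_cases hv : (pc.getD p.1 PySem.Dict.empty).contains p.2
        · simp only [pvBStep, pvInsStep, hc, hv, Bool.not_true, Bool.false_eq_true, if_false]
          exact (pv_insert_getD_self pc p.1 PySem.Dict.empty hnd hc).symm
        · have hv' : (pc.getD p.1 PySem.Dict.empty).contains p.2 = false := by simpa using hv
          simp [pvBStep, pvInsStep, hc, hv']
      · have hc' : pc.contains p.1 = false := by simpa using hc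
        simp [pvBStep, pvInsStep, hc', PySem.Dict.getD_insert_self, PySem.Dict.contains_empty,
          PySem.Dict.getD_of_not_contains _ _ hc', PySem.Dict.insert_insert_self]
    have hnd' : (pvInsStep cnt pc p).keys.Nodup :=
      PySem.Dict.nodup_keys_insert _ _ _ hnd
    rw [List.foldl_cons, List.foldl_cons, hstep, ih _ hnd']

-- The column lemma: B's guarded fold over a pair column equals A's incremental fold.
lemma pv_column (P : List (String × String)) :
    P.foldl (pvBStep (fun p => (P.count p : Int))) PySem.Dict.empty
      = P.foldl pvAPairStep PySem.Dict.empty := by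
  rw [pv_bstep_insert_form _ P PySem.Dict.empty (by rw [PySem.Dict.keys_empty]; exact List.nodup_nil)]
  apply pv_dict_ext _ _ PySem.Dict.empty
  · exact PySem.Dict.nodup_keys_foldl_insert_key P (fun (p : String × String) => p.1)
      (fun d p => if !((d.getD p.1 PySem.Dict.empty).contains p.2)
        then (d.getD p.1 PySem.Dict.empty).insert p.2 ((P.count p : Int))
        else d.getD p.1 PySem.Dict.empty) PySem.Dict.empty
      (by rw [PySem.Dict.keys_empty]; exact List.nodup_nil)
  · exact PySem.Dict.nodup_keys_foldl_insert_key P (fun (p : String × String) => p.1)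
      (fun d p => (d.getD p.1 PySem.Dict.empty).insert p.2
        ((d.getD p.1 PySem.Dict.empty).getD p.2 0 + 1)) PySem.Dict.empty
      (by rw [PySem.Dict.keys_empty]; exact List.nodup_nil)
  · rw [show P.foldl (pvInsStep (fun p => (P.count p : Int))) PySem.Dict.empty
        = P.foldl (fun d (p : String × String) => d.insert p.1
            (if !((d.getD p.1 PySem.Dict.empty).contains p.2)
             then (d.getD p.1 PySem.Dict.empty).insert p.2 ((P.count p : Int))
             else d.getD p.1 PySem.Dict.empty)) PySem.Dict.empty from rfl,
      PySem.Dict.keys_foldl_insert_key P (fun (p : String × String) => p.1) _ PySem.Dict.empty,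
      show P.foldl pvAPairStep PySem.Dict.empty
        = P.foldl (fun d (p : String × String) => d.insert p.1
            ((d.getD p.1 PySem.Dict.empty).insert p.2
              ((d.getD p.1 PySem.Dict.empty).getD p.2 0 + 1))) PySem.Dict.empty from rfl,
      PySem.Dict.keys_foldl_insert_key P (fun (p : String × String) => p.1) _ PySem.Dict.empty]
  · intro cls
    rw [show P.foldl (pvInsStep (fun p => (P.count p : Int))) PySem.Dict.empty
        = P.foldl (fun d (p : String × String) => d.insert p.1
            ((fun (dj : PySem.Dict String Int) (p : String × String) =>
                if !(dj.contains p.2) then dj.insert p.2 ((P.count p : Int)) else dj)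
              (d.getD p.1 PySem.Dict.empty) p)) PySem.Dict.empty from rfl,
      pv_getD_foldl_insert_group (fun (p : String × String) => p.1)
        (fun (dj : PySem.Dict String Int) (p : String × String) =>
          if !(dj.contains p.2) then dj.insert p.2 ((P.count p : Int)) else dj)
        PySem.Dict.empty P PySem.Dict.empty cls,
      show P.foldl pvAPairStep PySem.Dict.empty
        = P.foldl (fun d (p : String × String) => d.insert p.1
            ((fun (dj : PySem.Dict String Int) (p : String × String) =>
                dj.insert p.2 (dj.getD p.2 0 + 1))
              (d.getD p.1 PySem.Dict.empty) p)) PySem.Dict.empty from rfl,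
      pv_getD_foldl_insert_group (fun (p : String × String) => p.1)
        (fun (dj : PySem.Dict String Int) (p : String × String) =>
          dj.insert p.2 (dj.getD p.2 0 + 1))
        PySem.Dict.empty P PySem.Dict.empty cls,
      PySem.Dict.getD_empty]
    set Q : List (String × String) := P.filter (fun p => p.1 == cls) with hQ
    have hAside : Q.foldl (fun (dj : PySem.Dict String Int) (p : String × String) =>
        dj.insert p.2 (dj.getD p.2 0 + 1)) PySem.Dict.empty
        = PySem.Dict.counter (Q.map Prod.snd) := by
      rw [← PySem.Dict.foldl_insert_getD_add_one_eq_counter, List.foldl_map]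
    have hBside : Q.foldl (fun (dj : PySem.Dict String Int) (p : String × String) =>
        if !(dj.contains p.2) then dj.insert p.2 ((P.count p : Int)) else dj) PySem.Dict.empty
        = PySem.Dict.counter (Q.map Prod.snd) := by
      have hcnt : ∀ p ∈ Q, (P.count p : Int) = ((Q.map Prod.snd).count p.2 : Int) := by
        intro p hp
        have hp1 : p.1 = cls := by
          have := (List.mem_filter.mp hp).2
          simpa using this
        have h1 : Q.count p = P.count p := by
          rw [hQ]
          exact List.count_filter (by simp [hp1])
        have h2 : (Q.map Prod.snd).count p.2 = Q.count p := by
          apply pv_count_map_inj Prod.snd p Q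
          intro y hy hys
          have hy1 : y.1 = cls := by
            have := (List.mem_filter.mp hy).2
            simpa using this
          obtain ⟨y1, y2⟩ := y
          obtain ⟨p1, p2⟩ := p
          simp only at hys hy1 hp1
          simp [hy1, hp1, hys]
        rw [h2, h1]
      rw [PySem.List.foldl_congr_mem' Q _ (fun (dj : PySem.Dict String Int) (p : String × String) =>
          if !(dj.contains p.2) then dj.insert p.2 (((Q.map Prod.snd).count p.2 : Int)) else dj)
        PySem.Dict.empty (by
          intro p hp acc
          rw [hcnt p hp]),
        show Q.foldl (fun (dj : PySem.Dict String Int) (p : String × String) =>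
            if !(dj.contains p.2) then dj.insert p.2 (((Q.map Prod.snd).count p.2 : Int)) else dj)
            PySem.Dict.empty
          = (Q.map Prod.snd).foldl (fun (dj : PySem.Dict String Int) (v : String) =>
              if !(dj.contains v) then dj.insert v (((Q.map Prod.snd).count v : Int)) else dj)
            PySem.Dict.empty from
          (List.foldl_map (f := Prod.snd)
            (g := fun (dj : PySem.Dict String Int) (v : String) =>
              if !(dj.contains v) then dj.insert v (((Q.map Prod.snd).count v : Int)) else dj)
            (l := Q) (init := PySem.Dict.empty)).symm]
      exact pv_guarded_eq_counter (Q.map Prod.snd)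
    rw [hAside, hBside]

-- Cells of one row restricted to index j.
lemma pv_cellsOf_filter (r : List String) (j : Int) (hj : 0 ≤ j) :
    (pvCellsOf r).filter (fun c => c.1 == j)
      = if j + 1 < (r.length : Int)
        then [(j, PySem.List.pyGetD r (-1) "", PySem.List.pyGetD r j "")]
        else [] := by
  unfold pvCellsOf
  rw [List.filter_map,
    show ((fun (c : Int × String × String) => c.1 == j) ∘
        (fun x => (x, PySem.List.pyGetD r ((r.length : Int) - 1) "", PySem.List.pyGetD r x "")))
      = (fun (x : Int) => x == j) from rfl,
    List.filter_beq]
  by_cases h : j + 1 < (r.length : Int)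
  · have hmem : j ∈ PySem.List.pyRange 0 ((r.length : Int) - 1) 1 :=
      PySem.List.mem_pyRange_one.mpr ⟨hj, by omega⟩
    have hcount : (PySem.List.pyRange 0 ((r.length : Int) - 1) 1).count j = 1 :=
      List.count_eq_one_of_mem (PySem.List.nodup_pyRange_one _ _) hmem
    have hne : r ≠ [] := by
      intro hr
      rw [hr] at h
      simp at h
      omega
    rw [hcount, if_pos h, List.replicate_one, List.map_singleton,
      pv_pyGetD_neg_one r hne]
  · have hnm : j ∉ PySem.List.pyRange 0 ((r.length : Int) - 1) 1 := by
      intro hmem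
      have := PySem.List.mem_pyRange_one.mp hmem
      omega
    rw [List.count_eq_zero_of_not_mem hnm, if_neg h, List.replicate_zero, List.map_nil]

-- All cells restricted to index j are exactly column j's pairs, lifted.
lemma pv_cells_filter (ts : List (List String)) (j : Int) (hj : 0 ≤ j) :
    (pvCells ts).filter (fun c => c.1 == j)
      = (pvColPairs ts j).map (fun p => (j, p.1, p.2)) := by
  induction ts with
  | nil => rfl
  | cons r t ih =>
    rw [show pvCells (r :: t) = pvCellsOf r ++ pvCells t from rfl,
      List.filter_append, pv_cellsOf_filter r j hj, ih]
    unfold pvColPairs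
    rw [List.filter_cons]
    by_cases h : j + 1 < (r.length : Int)
    · rw [if_pos h, if_pos (by simp [PySem.List.len_eq]; omega), List.map_cons]
      rfl
    · rw [if_neg h, if_neg (by simp [PySem.List.len_eq]; omega), List.nil_append]

-- Merging two from-zero ranges as sets.
lemma pv_range_nonpos (a : Int) (ha : a ≤ 0) : PySem.List.pyRange 0 a 1 = [] := by
  rw [PySem.List.pyRange_one]
  have : (a - 0).toNat = 0 := by omega
  rw [this, List.range_zero, List.map_nil]

lemma pv_update_range (a b : Int) :
    PySem.Set.update (PySem.List.pyRange 0 a 1) (PySem.List.pyRange 0 b 1)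
      = PySem.List.pyRange 0 (max a b) 1 := by
  by_cases ha : a ≤ 0
  · rw [pv_range_nonpos a ha, PySem.Set.update_nil_left,
      PySem.Set.ofList_eq_self_of_nodup _ (PySem.List.nodup_pyRange_one _ _)]
    by_cases hab : a ≤ b
    · rw [max_eq_right hab]
    · rw [pv_range_nonpos b (by omega), pv_range_nonpos (max a b) (by omega)]
  · have hfilter : List.filter
        (fun y => !(PySem.Set.contains (PySem.List.pyRange 0 a 1) y))
        (PySem.List.pyRange 0 b 1)
        = PySem.List.pyRange a b 1 := by
      rw [List.filter_congr (q := fun y => decide (a ≤ y)) (by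
        intro y hy
        have hyb := PySem.List.mem_pyRange_one.mp hy
        by_cases hay : a ≤ y
        · have hnm : y ∉ PySem.List.pyRange 0 a 1 := by
            intro hmem
            have := PySem.List.mem_pyRange_one.mp hmem
            omega
          simp [hay, hnm]
        · have hm : y ∈ PySem.List.pyRange 0 a 1 :=
            PySem.List.mem_pyRange_one.mpr ⟨hyb.1, by omega⟩
          simp [hay, hm])]
      by_cases hab : a ≤ b
      · rw [PySem.List.pyRange_one_append 0 a b (by omega) hab, List.filter_append,
          List.filter_eq_nil_iff.mpr (by
            intro y hy
            have := PySem.List.mem_pyRange_one.mp hy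
            simp
            omega),
          List.filter_eq_self.mpr (by
            intro y hy
            have := PySem.List.mem_pyRange_one.mp hy
            simp
            omega),
          List.nil_append]
      · have hb : PySem.List.pyRange a b 1 = [] := by
          rw [PySem.List.pyRange_one]
          have h0 : (b - a).toNat = 0 := by omega
          rw [h0, List.range_zero, List.map_nil]
        rw [hb]
        exact List.filter_eq_nil_iff.mpr (by
          intro y hy
          have := PySem.List.mem_pyRange_one.mp hy
          simp
          omega)
    rw [PySem.Set.update_eq_append_filter,
      PySem.Set.ofList_eq_self_of_nodup _ (PySem.List.nodup_pyRange_one _ _), hfilter]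
    by_cases hab : a ≤ b
    · rw [max_eq_right hab, ← PySem.List.pyRange_one_append 0 a b (by omega) hab]
    · have hb : PySem.List.pyRange a b 1 = [] := by
        rw [PySem.List.pyRange_one]
        have h0 : (b - a).toNat = 0 := by omega
        rw [h0, List.range_zero, List.map_nil]
      rw [hb, List.append_nil, max_eq_left (by omega)]

lemma pv_keys_range (ts : List (List String)) :
    PySem.Set.ofList ((pvCells ts).map (fun c => c.1))
      = PySem.List.pyRange 0 (pvWidth ts - 1) 1 := by
  have h1 : (pvCells ts).map (fun c => c.1)
      = ts.flatMap (fun r => PySem.List.pyRange 0 ((r.length : Int) - 1) 1) := by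
    unfold pvCells
    rw [List.map_flatMap]
    congr 1
    funext r
    unfold pvCellsOf
    rw [List.map_map]
    exact List.map_id _
  rw [h1]
  clear h1
  induction ts using List.reverseRecOn with
  | nil => rfl
  | append_singleton t r ih =>
    rw [List.flatMap_append, PySem.Set.ofList_append, ih]
    have hflat : (([r] : List (List String)).flatMap
        (fun r => PySem.List.pyRange 0 ((r.length : Int) - 1) 1))
        = PySem.List.pyRange 0 ((r.length : Int) - 1) 1 := by
      simp [List.flatMap_cons]
    rw [hflat, pv_update_range (pvWidth t - 1) ((r.length : Int) - 1)]
    have hw : pvWidth (t ++ [r]) = max (pvWidth t) (PySem.List.len r) := by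
      unfold pvWidth
      rw [List.foldl_append, List.foldl_cons, List.foldl_nil]
    have hlen : PySem.List.len r = (r.length : Int) := PySem.List.len_eq r
    have hmax : max (pvWidth t - 1) ((r.length : Int) - 1) = pvWidth (t ++ [r]) - 1 := by
      rw [hw, hlen]
      omega
    rw [hmax]

-- ===== VERDICT (by name: the statement is the Claim_ definition above) =====
theorem calculate_posteriors_supervised_spec : Claim_equal_calculate_posteriors_supervised := by
  intro ts _
  unfold Spec_calculate_posteriors_supervised
  -- A's literal fold in canonical form.
  have hA : ts.foldl (fun cp val =>
      (PySem.List.pyRange 0 ((val.length : Int) - 1) 1).foldl (fun cp j =>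
        let cp := if !(cp.contains j) then cp.insert j PySem.Dict.empty else cp
        let cls := PySem.List.pyGetD val ((val.length : Int) - 1) ""
        let dj := cp.getD j PySem.Dict.empty
        let dj := if !(dj.contains cls) then dj.insert cls PySem.Dict.empty else dj
        let v := PySem.List.pyGetD val j ""
        let djc := dj.getD cls PySem.Dict.empty
        let djc := if !(djc.contains v) then djc.insert v 1 else djc.insert v (djc.getD v 0 + 1)
        cp.insert j (dj.insert cls djc)) cp) PySem.Dict.empty
      = (pvCells ts).foldl pvNStepA PySem.Dict.empty := by
    rw [pvCells, pv_foldl_flatMap pvCellsOf pvNStepA ts PySem.Dict.empty]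
    apply PySem.List.foldl_congr_mem
    intro d row _
    have hstep : (PySem.List.pyRange 0 ((row.length : Int) - 1) 1).foldl (fun cp j =>
        let cp := if !(cp.contains j) then cp.insert j PySem.Dict.empty else cp
        let cls := PySem.List.pyGetD row ((row.length : Int) - 1) ""
        let dj := cp.getD j PySem.Dict.empty
        let dj := if !(dj.contains cls) then dj.insert cls PySem.Dict.empty else dj
        let v := PySem.List.pyGetD row j ""
        let djc := dj.getD cls PySem.Dict.empty
        let djc := if !(djc.contains v) then djc.insert v 1 else djc.insert v (djc.getD v 0 + 1)
        cp.insert j (dj.insert cls djc)) d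
        = (PySem.List.pyRange 0 ((row.length : Int) - 1) 1).foldl (fun cp j =>
            pvNStepA cp (j, PySem.List.pyGetD row ((row.length : Int) - 1) "",
              PySem.List.pyGetD row j "")) d := by
      apply PySem.List.foldl_congr_mem
      intro cp j _
      exact pv_stepA_canon cp (PySem.List.pyGetD row ((row.length : Int) - 1) "")
        (PySem.List.pyGetD row j "") j
    rw [hstep, pvCellsOf, List.foldl_map]
  -- canonical A-dict = canonical B-dict
  have hm : (pvCells ts).foldl pvNStepA PySem.Dict.empty
      = (PySem.List.pyRange 0 (pvWidth ts - 1) 1).foldl (fun res j =>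
          res.insert j ((pvColPairs ts j).foldl
            (pvBStep (fun p => ((pvColPairs ts j).count p : Int))) PySem.Dict.empty))
          PySem.Dict.empty := by
    apply pv_dict_ext _ _ PySem.Dict.empty
    · exact PySem.Dict.nodup_keys_foldl_insert_key (pvCells ts)
        (fun (c : Int × String × String) => c.1)
        (fun d c => pvIStepA (d.getD c.1 PySem.Dict.empty) c) PySem.Dict.empty
        (by rw [PySem.Dict.keys_empty]; exact List.nodup_nil)
    · exact PySem.Dict.nodup_keys_foldl_insert (PySem.List.pyRange 0 (pvWidth ts - 1) 1)
        (fun _ j => (pvColPairs ts j).foldl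
          (pvBStep (fun p => ((pvColPairs ts j).count p : Int))) PySem.Dict.empty)
        PySem.Dict.empty (by rw [PySem.Dict.keys_empty]; exact List.nodup_nil)
    · rw [show (pvCells ts).foldl pvNStepA PySem.Dict.empty
          = (pvCells ts).foldl (fun d (c : Int × String × String) =>
              d.insert c.1 (pvIStepA (d.getD c.1 PySem.Dict.empty) c)) PySem.Dict.empty from rfl,
        PySem.Dict.keys_foldl_insert_key (pvCells ts) (fun (c : Int × String × String) => c.1)
          _ PySem.Dict.empty,
        PySem.Dict.keys_foldl_insert (PySem.List.pyRange 0 (pvWidth ts - 1) 1)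
          (fun _ j => (pvColPairs ts j).foldl
            (pvBStep (fun p => ((pvColPairs ts j).count p : Int))) PySem.Dict.empty)
          PySem.Dict.empty,
        PySem.Dict.keys_empty, PySem.Set.update_nil_left, PySem.Set.update_nil_left,
        pv_keys_range ts,
        PySem.Set.ofList_eq_self_of_nodup _ (PySem.List.nodup_pyRange_one _ _)]
    · intro j
      rw [show (pvCells ts).foldl pvNStepA PySem.Dict.empty
          = (pvCells ts).foldl (fun d (c : Int × String × String) =>
              d.insert c.1 (pvIStepA (d.getD c.1 PySem.Dict.empty) c)) PySem.Dict.empty from rfl,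
        pv_getD_foldl_insert_group (fun (c : Int × String × String) => c.1) pvIStepA
          PySem.Dict.empty (pvCells ts) PySem.Dict.empty j,
        show (PySem.List.pyRange 0 (pvWidth ts - 1) 1).foldl (fun res j =>
            res.insert j ((pvColPairs ts j).foldl
              (pvBStep (fun p => ((pvColPairs ts j).count p : Int))) PySem.Dict.empty))
            PySem.Dict.empty
          = (PySem.List.pyRange 0 (pvWidth ts - 1) 1).foldl (fun res (x : Int) =>
              res.insert x ((fun (_ : PySem.Dict String (PySem.Dict String Int)) (x : Int) =>
                  (pvColPairs ts x).foldl
                    (pvBStep (fun p => ((pvColPairs ts x).count p : Int))) PySem.Dict.empty)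
                (res.getD x PySem.Dict.empty) x)) PySem.Dict.empty from rfl,
        pv_getD_foldl_insert_group (fun (x : Int) => x)
          (fun (_ : PySem.Dict String (PySem.Dict String Int)) (x : Int) =>
            (pvColPairs ts x).foldl
              (pvBStep (fun p => ((pvColPairs ts x).count p : Int))) PySem.Dict.empty)
          PySem.Dict.empty (PySem.List.pyRange 0 (pvWidth ts - 1) 1) PySem.Dict.empty j,
        PySem.Dict.getD_empty, List.filter_beq]
      by_cases hj : j ∈ PySem.List.pyRange 0 (pvWidth ts - 1) 1
      · have hj0 : 0 ≤ j := (PySem.List.mem_pyRange_one.mp hj).1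
        rw [List.count_eq_one_of_mem (PySem.List.nodup_pyRange_one _ _) hj,
          List.replicate_one, List.foldl_cons, List.foldl_nil,
          pv_cells_filter ts j hj0, List.foldl_map,
          show (pvColPairs ts j).foldl (fun d (p : String × String) =>
              pvIStepA d (j, p.1, p.2)) PySem.Dict.empty
            = (pvColPairs ts j).foldl pvAPairStep PySem.Dict.empty from rfl,
          ← pv_column (pvColPairs ts j)]
      · rw [List.count_eq_zero_of_not_mem hj, List.replicate_zero, List.foldl_nil,
          List.filter_eq_nil_iff.mpr (by
            intro c hc hcj
            apply hj
            have h1 : c.1 = j := by simpa using hcj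
            have h2 : j ∈ (pvCells ts).map (fun c => c.1) := by
              rw [← h1]
              exact List.mem_map_of_mem hc
            have h3 : j ∈ PySem.Set.ofList ((pvCells ts).map (fun c => c.1)) :=
              (PySem.Set.mem_ofList _ j).mpr h2
            rwa [pv_keys_range ts] at h3),
          List.foldl_nil]
  exact congrArg
    (fun d : PySem.Dict Int (PySem.Dict String (PySem.Dict String Int)) =>
      d.items.map (fun p => (p.1, p.2.items.map (fun q => (q.1, q.2.items)))))
    (hA.trans hm)
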